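-- pv_equiv track=rewrite | github.com/drizztSun/common_project | PythonLeetcode/leetcodeM/261_GraphValidTree.py | doit_dfs_recursive
-- ===== SOURCE A (Python) =====
-- def doit_dfs_recursive(n: int, edges: list) -> bool:
--
--     if len(edges) != n - 1: return False
--
--     adj_list = [[] for _ in range(n)]
--     for A, B in edges:
--         adj_list[A].append(B)
--         adj_list[B].append(A)
--
--     seen = set()
--
--     def dfs(node, parent):
--         if node in seen: return;
--         seen.add(node)
--         for neighbour in adj_list[node]:
--             if neighbour == parent:
--                 continue
--             if neighbour in seen:
--                 return False
--             result = dfs(neighbour, node)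
--             if not result: return False
--         return True
--
--     # We return true iff no cycles were detected,
--     # AND the entire graph has been reached.
--     return dfs(0, -1) and len(seen) == n
-- ===== SOURCE B (Python) =====
-- def doit_dfs_recursive(n: int, edges: list) -> bool:
--     # Iterative DFS with an explicit stack instead of recursion (no RecursionError on deep graphs).
--     if len(edges) != n - 1:
--         return False
--
--     adj = [[] for _ in range(n)]
--     for a, b in edges:
--         adj[a].append(b)
--         adj[b].append(a)
--
--     seen = {0}
--     stack = [(0, -1, adj[0])]
--     while stack:
--         node, parent, rest = stack[-1]
--         if not rest:
--             stack.pop()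
--             continue
--         nb = rest[0]
--         stack[-1] = (node, parent, rest[1:])
--         if nb == parent:
--             continue
--         if nb in seen:
--             return False
--         seen.add(nb)
--         stack.append((nb, node, adj[nb]))
--     return len(seen) == n
-- ===== Notes on version B (the rewrite author's own statement) =====
-- stated objective: alternative
-- what changed: The recursive DFS (nested function dfs with recursion and Python's recursion stack) is replaced by an iterative DFS over an explicit stack of (node, parent, pending-neighbours) frames; same traversal and cycle/connectivity checks, but no recursion (so no RecursionError on deep path graphs).
import Mathlib
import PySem

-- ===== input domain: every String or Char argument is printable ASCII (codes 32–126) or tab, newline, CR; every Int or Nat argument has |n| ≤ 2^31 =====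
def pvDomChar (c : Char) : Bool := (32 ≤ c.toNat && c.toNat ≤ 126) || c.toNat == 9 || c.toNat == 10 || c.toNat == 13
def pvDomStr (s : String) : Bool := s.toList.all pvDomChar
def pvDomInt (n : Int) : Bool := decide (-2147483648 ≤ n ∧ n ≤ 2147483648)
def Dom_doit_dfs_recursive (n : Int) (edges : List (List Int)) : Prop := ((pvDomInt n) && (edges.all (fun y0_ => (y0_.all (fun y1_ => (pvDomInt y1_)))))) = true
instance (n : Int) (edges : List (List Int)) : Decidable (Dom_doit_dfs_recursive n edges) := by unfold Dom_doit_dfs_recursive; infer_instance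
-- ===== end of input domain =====

-- B replaces A's recursive DFS by an iterative DFS with an explicit stack (same traversal, no recursion);
-- equivalence is about the return value only (neither program mutates its arguments).

-- ===== PORT A =====

-- shared helper (both Pythons build the adjacency list with the same two lines):
-- `adj[i].append(v)` — negative i wraps as in Python; out-of-range = IndexError (excluded by Pre_, list left unchanged)
def pvAppend (xs : List (List Int)) (i v : Int) : List (List Int) :=
  match PySem.List.pyGet? xs i with
  | some l => PySem.List.pySetD xs i (l ++ [v])
  | none => xs

-- `adj = [[] for _ in range(n)]; for A, B in edges: adj[A].append(B); adj[B].append(A)`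
-- (an edge that is not a 2-list = ValueError in Python, excluded by Pre_; here it is skipped)
def pvBuildAdj (n : Int) (edges : List (List Int)) : List (List Int) :=
  edges.foldl (fun adj e =>
    match e with
    | [a, b] => pvAppend (pvAppend adj a b) b a
    | _ => adj) (List.replicate n.toNat [])

-- `adj_list[node]` (IndexError = none, excluded by Pre_)
def pvAdjAt (adj : List (List Int)) (node : Int) : List Int :=
  (PySem.List.pyGet? adj node).getD []

mutual
-- A's nested `def dfs(node, parent)`: returns (None = `return` with no value, or the bool) and the seen set.
-- The fuel argument is only a totality guard; `doit_dfs_recursive` supplies enough fuel (proved below).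
def pvDfsA (adj : List (List Int)) (f : Nat) (node parent : Int) (seen : List Int) :
    Option Bool × List Int :=
  match f with
  | 0 => (none, seen)
  | f' + 1 =>
    if node ∈ seen then (none, seen)
    else pvLoopA adj f' node parent (pvAdjAt adj node) (PySem.Set.add seen node)
termination_by (f, 0)

-- the `for neighbour in adj_list[node]` loop body of dfs
def pvLoopA (adj : List (List Int)) (f : Nat) (node parent : Int) (nbs seen : List Int) :
    Option Bool × List Int :=
  match nbs with
  | [] => (some true, seen)
  | nb :: rest =>
    if nb = parent then pvLoopA adj f node parent rest seen
    else if nb ∈ seen then (some false, seen)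
    else match pvDfsA adj f nb node seen with
      | (some true, s') => pvLoopA adj f node parent rest s'
      | (_, s') => (some false, s')
termination_by (f, nbs.length + 1)
end

def doit_dfs_recursive (n : Int) (edges : List (List Int)) : Bool :=
  if (edges.length : Int) ≠ n - 1 then false
  else
    let adj := pvBuildAdj n edges
    match pvDfsA adj (adj.flatten.length + 3) 0 (-1) [] with
    | (some true, s) => decide ((s.length : Int) = n)
    | _ => false

-- ===== PORT B =====

-- ints occurring in the pending-neighbour lists of the stack frames (for termination only)
def pvStackInts (stack : List (Int × Int × List Int)) : Finset Int :=
  stack.foldr (fun fr s => fr.2.2.toFinset ∪ s) ∅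

-- sum of pending work on the stack (for termination only)
def pvM (stack : List (Int × Int × List Int)) : Nat :=
  (stack.map (fun fr => fr.2.2.length + 1)).sum

lemma pvAdjAt_subset (adj : List (List Int)) (node : Int) :
    (pvAdjAt adj node).toFinset ⊆ adj.flatten.toFinset := by
  unfold pvAdjAt
  cases h : PySem.List.pyGet? adj node with
  | none => simp
  | some l =>
    have hl : l ∈ adj := PySem.List.mem_of_pyGet?_eq_some adj h
    intro x hx
    simp only [List.mem_toFinset] at hx ⊢
    exact List.mem_flatten.mpr ⟨l, hl, hx⟩

lemma pvAdd_toFinset (seen : List Int) (x : Int) (hx : x ∉ seen) :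
    (PySem.Set.add seen x).toFinset = insert x seen.toFinset := by
  rw [PySem.Set.add_of_not_mem hx]
  simp [List.toFinset_append, Finset.union_comm]

-- termination lemma for the push step of the stack machine
lemma pvStackInts_cons (fr : Int × Int × List Int) (l : List (Int × Int × List Int)) :
    pvStackInts (fr :: l) = fr.2.2.toFinset ∪ pvStackInts l := rfl

-- termination lemma for the push step of the stack machine
lemma pvPushDec (adj : List (List Int)) (node parent nb : Int) (rest : List Int)
    (frames : List (Int × Int × List Int)) (seen : List Int) (hnb : nb ∉ seen) :
    ((pvStackInts ((nb, node, pvAdjAt adj nb) :: (node, parent, rest) :: frames) ∪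
        adj.flatten.toFinset) \ (PySem.Set.add seen nb).toFinset).card <
    ((pvStackInts ((node, parent, nb :: rest) :: frames) ∪
        adj.flatten.toFinset) \ seen.toFinset).card := by
  apply Finset.card_lt_card
  rw [pvAdd_toFinset seen nb hnb]
  constructor
  · intro x hx
    rw [Finset.mem_sdiff] at hx ⊢
    obtain ⟨hmem, hns⟩ := hx
    have hxnb : x ≠ nb := fun e => hns (by rw [e]; exact Finset.mem_insert_self _ _)
    have hxs : x ∉ seen.toFinset := fun e => hns (Finset.mem_insert_of_mem e)
    refine ⟨?_, hxs⟩
    rw [pvStackInts_cons, pvStackInts_cons, Finset.mem_union, Finset.mem_union,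
      Finset.mem_union] at hmem
    rw [pvStackInts_cons, Finset.mem_union, Finset.mem_union]
    rcases hmem with (h | h | h) | h
    · right; exact pvAdjAt_subset adj nb h
    · left; left
      simp only [List.toFinset_cons]
      exact Finset.mem_insert_of_mem h
    · left; right; exact h
    · right; exact h
  · intro hsub
    have hin : nb ∈ ((pvStackInts ((node, parent, nb :: rest) :: frames) ∪
        adj.flatten.toFinset) \ seen.toFinset) := by
      rw [Finset.mem_sdiff, pvStackInts_cons]
      refine ⟨Finset.mem_union_left _ (Finset.mem_union_left _ ?_), by simpa using hnb⟩
      simp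
    have h2 := hsub hin
    rw [Finset.mem_sdiff] at h2
    exact h2.2 (Finset.mem_insert_self _ _)

def pvRunB (n : Int) (adj : List (List Int)) (stack : List (Int × Int × List Int))
    (seen : List Int) : Bool :=
  match stack with
  | [] => decide ((seen.length : Int) = n)
  | (_node, _parent, []) :: frames => pvRunB n adj frames seen
  | (node, parent, nb :: rest) :: frames =>
    if nb = parent then pvRunB n adj ((node, parent, rest) :: frames) seen
    else if nb ∈ seen then false
    else pvRunB n adj
      ((nb, node, pvAdjAt adj nb) :: (node, parent, rest) :: frames)
      (PySem.Set.add seen nb)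
termination_by (((pvStackInts stack ∪ adj.flatten.toFinset) \ seen.toFinset).card, pvM stack)
decreasing_by
  · -- pop an exhausted frame
    have h1 : ((pvStackInts frames ∪ adj.flatten.toFinset) \ seen.toFinset).card ≤
        ((pvStackInts ((_node, _parent, ([] : List Int)) :: frames) ∪ adj.flatten.toFinset) \ seen.toFinset).card := by
      apply Finset.card_le_card
      apply Finset.sdiff_subset_sdiff _ (Finset.Subset.refl _)
      simp [pvStackInts]
    rcases lt_or_eq_of_le h1 with h | h
    · exact Prod.Lex.left _ _ h
    · rw [h]; exact Prod.Lex.right _ (by simp [pvM])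
  · -- skip the parent
    have h1 : ((pvStackInts ((node, parent, rest) :: frames) ∪ adj.flatten.toFinset) \ seen.toFinset).card ≤
        ((pvStackInts ((node, parent, nb :: rest) :: frames) ∪ adj.flatten.toFinset) \ seen.toFinset).card := by
      apply Finset.card_le_card
      apply Finset.sdiff_subset_sdiff _ (Finset.Subset.refl _)
      apply Finset.union_subset_union _ (Finset.Subset.refl _)
      simp only [pvStackInts, List.foldr_cons]
      apply Finset.union_subset_union _ (Finset.Subset.refl _)
      intro x hx; simp at hx ⊢; tauto
    rcases lt_or_eq_of_le h1 with h | h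
    · exact Prod.Lex.left _ _ h
    · rw [h]; exact Prod.Lex.right _ (by simp [pvM])
  · -- push a fresh node
    exact Prod.Lex.left _ _ (pvPushDec adj node parent nb rest frames seen (by assumption))

def doit_dfs_recursive_alt (n : Int) (edges : List (List Int)) : Bool :=
  if (edges.length : Int) ≠ n - 1 then false
  else
    let adj := pvBuildAdj n edges
    pvRunB n adj [(0, -1, pvAdjAt adj 0)] (PySem.Set.ofList [0])

-- ===== PRECONDITION & SPEC =====

-- Pre_ excludes exactly the inputs on which the Python raises: when len(edges) == n-1 the edges must
-- all be 2-lists (else ValueError on unpacking) with endpoints that are valid indices into the n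
-- adjacency lists, i.e. in [-n, n) (else IndexError); when len(edges) != n-1 A returns False at once
-- and every input is admitted.
def Pre_doit_dfs_recursive (n : Int) (edges : List (List Int)) : Prop :=
  (edges.length : Int) = n - 1 →
    ∀ e ∈ edges, e.length = 2 ∧ ∀ x ∈ e, -n ≤ x ∧ x < n
instance (n : Int) (edges : List (List Int)) : Decidable (Pre_doit_dfs_recursive n edges) := by
  unfold Pre_doit_dfs_recursive; infer_instance

def pvWitness_doit_dfs_recursive : Int × List (List Int) := (3, [[0, 1], [1, 2]])

def Spec_doit_dfs_recursive (n : Int) (edges : List (List Int)) (out : Bool) : Prop :=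
  out = doit_dfs_recursive_alt n edges
instance (n : Int) (edges : List (List Int)) (out : Bool) :
    Decidable (Spec_doit_dfs_recursive n edges out) := by
  unfold Spec_doit_dfs_recursive; infer_instance

-- ===== CLAIM (what is proved, stated in full; the proofs are below) =====
def Claim_equal_doit_dfs_recursive : Prop := ∀ (n : Int) (edges : List (List Int)), Dom_doit_dfs_recursive n edges → Pre_doit_dfs_recursive n edges → Spec_doit_dfs_recursive n edges (doit_dfs_recursive n edges)

-- ===== LEMMAS AND PROOFS =====

-- A's loop always returns an actual bool (None arises only from the seen-check/fuel inside dfs)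
lemma pvLoopA_some (adj : List (List Int)) (f : Nat) (node parent : Int) :
    ∀ (nbs seen : List Int), ∃ b s', pvLoopA adj f node parent nbs seen = (some b, s') := by
  intro nbs
  induction nbs with
  | nil => intro seen; exact ⟨true, seen, by rw [pvLoopA]⟩
  | cons nb rest ih =>
    intro seen
    rw [pvLoopA]
    by_cases h1 : nb = parent
    · simpa [h1] using ih seen
    · by_cases h2 : nb ∈ seen
      · exact ⟨false, seen, by simp [h1, h2]⟩
      · simp only [h1, h2, if_false, if_neg, ite_false]
        rcases hd : pvDfsA adj f nb node seen with ⟨r, s'⟩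
        rcases r with _ | b
        · exact ⟨false, s', by simp [h1, h2, hd]⟩
        · rcases b with _ | _
          · exact ⟨false, s', by simp [h1, h2, hd]⟩
          · simpa [h1, h2, hd] using ih s'

-- fuel irrelevance + monotonicity of seen, proved mutually by strong induction on the fuel
def pvPdfs (adj : List (List Int)) (f : Nat) : Prop :=
  ∀ (g : Nat) (node parent : Int) (seen : List Int),
    1 + ((insert node adj.flatten.toFinset) \ seen.toFinset).card ≤ f →
    1 + ((insert node adj.flatten.toFinset) \ seen.toFinset).card ≤ g →
    pvDfsA adj f node parent seen = pvDfsA adj g node parent seen ∧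
    seen.toFinset ⊆ (pvDfsA adj f node parent seen).2.toFinset

def pvPloop (adj : List (List Int)) (f : Nat) : Prop :=
  ∀ (g : Nat) (node parent : Int) (nbs seen : List Int),
    nbs.toFinset ⊆ adj.flatten.toFinset →
    1 + (adj.flatten.toFinset \ seen.toFinset).card ≤ f →
    1 + (adj.flatten.toFinset \ seen.toFinset).card ≤ g →
    pvLoopA adj f node parent nbs seen = pvLoopA adj g node parent nbs seen ∧
    seen.toFinset ⊆ (pvLoopA adj f node parent nbs seen).2.toFinset

lemma pvCardStep (adj : List (List Int)) (node : Int) (seen : List Int) (h : node ∉ seen) :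
    ((insert node adj.flatten.toFinset) \ seen.toFinset).card =
    1 + (adj.flatten.toFinset \ (PySem.Set.add seen node).toFinset).card := by
  rw [pvAdd_toFinset seen node h]
  have hset : (insert node adj.flatten.toFinset) \ seen.toFinset =
      insert node (adj.flatten.toFinset \ insert node seen.toFinset) := by
    ext x
    simp only [Finset.mem_sdiff, Finset.mem_insert, List.mem_toFinset]
    constructor
    · rintro ⟨hx | hx, hs⟩
      · left; exact hx
      · by_cases hxn : x = node
        · left; exact hxn
        · right; exact ⟨hx, by push_neg; exact ⟨hxn, hs⟩⟩
    · rintro (hx | ⟨hx, hs⟩)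
      · subst hx; exact ⟨Or.inl rfl, by simpa using h⟩
      · push_neg at hs; exact ⟨Or.inr hx, hs.2⟩
  rw [hset, Finset.card_insert_of_notMem (by simp)]
  omega

lemma pvFuel (adj : List (List Int)) : ∀ f : Nat, pvPdfs adj f ∧ pvPloop adj f := by
  intro f
  induction f using Nat.strong_induction_on with
  | _ f ih =>
    have hdfs : pvPdfs adj f := by
      intro g node parent seen hf hg
      obtain ⟨f', rfl⟩ : ∃ f', f = f' + 1 := ⟨f - 1, by omega⟩
      obtain ⟨g', rfl⟩ : ∃ g', g = g' + 1 := ⟨g - 1, by omega⟩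
      rw [pvDfsA, pvDfsA]
      by_cases hn : node ∈ seen
      · simp [hn]
      · simp only [hn, if_false, ite_false]
        have hcard := pvCardStep adj node seen hn
        have hloop := (ih f' (by omega)).2 g' node parent (pvAdjAt adj node)
          (PySem.Set.add seen node) (pvAdjAt_subset adj node) (by omega) (by omega)
        refine ⟨hloop.1, ?_⟩
        intro x hx
        apply hloop.2
        rw [pvAdd_toFinset seen node hn]
        exact Finset.mem_insert_of_mem hx
    refine ⟨hdfs, ?_⟩
    intro g node parent nbs
    induction nbs with
    | nil => intro seen _ _ _; refine ⟨?_, ?_⟩ <;> simp [pvLoopA]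
    | cons nb rest ihn =>
      intro seen hsub hf hg
      have hnb : nb ∈ adj.flatten.toFinset := hsub (by simp)
      have hrest : rest.toFinset ⊆ adj.flatten.toFinset := by
        intro x hx; exact hsub (by simp at hx ⊢; tauto)
      rw [pvLoopA, pvLoopA]
      by_cases h1 : nb = parent
      · simpa [h1] using ihn seen hrest hf hg
      · by_cases h2 : nb ∈ seen
        · simp [h1, h2]
        · simp only [h1, h2, if_false, ite_false]
          have hins : insert nb adj.flatten.toFinset = adj.flatten.toFinset :=
            Finset.insert_eq_self.mpr hnb
          have hd := hdfs g nb node seen (by rw [hins]; omega) (by rw [hins]; omega)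
          rcases hdd : pvDfsA adj f nb node seen with ⟨r, s'⟩
          have hmono : seen.toFinset ⊆ s'.toFinset := by
            have := hd.2; rw [hdd] at this; exact this
          rw [← hd.1, hdd]
          have hcardle : (adj.flatten.toFinset \ s'.toFinset).card ≤
              (adj.flatten.toFinset \ seen.toFinset).card :=
            Finset.card_le_card (Finset.sdiff_subset_sdiff (Finset.Subset.refl _) hmono)
          rcases r with _ | b
          · exact ⟨by simp, by simpa using hmono⟩
          · rcases b with _ | _
            · exact ⟨by simp, by simpa using hmono⟩
            · simp only []
              have := ihn s' hrest (by omega) (by omega)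
              exact ⟨this.1, fun x hx => this.2 (hmono hx)⟩

-- the A-side meaning of a stack of pending frames, with the fixed fuel the top-level call produces
def pvAbsA (n : Int) (adj : List (List Int)) :
    List (Int × Int × List Int) → List Int → Bool
  | [], seen => decide ((seen.length : Int) = n)
  | (node, parent, rest) :: frames, seen =>
    match pvLoopA adj (adj.flatten.length + 2) node parent rest seen with
    | (some true, s') => pvAbsA n adj frames s'
    | _ => false

lemma pvCardE (adj : List (List Int)) (s : Finset Int) :
    (adj.flatten.toFinset \ s).card ≤ adj.flatten.length :=
  le_trans (Finset.card_le_card (Finset.sdiff_subset)) adj.flatten.toFinset_card_le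

-- the stack machine computes exactly the A-side meaning of its stack
lemma pvSim (n : Int) (adj : List (List Int)) :
    ∀ (stack : List (Int × Int × List Int)) (seen : List Int),
      (∀ fr ∈ stack, fr.2.2.toFinset ⊆ adj.flatten.toFinset) →
      pvRunB n adj stack seen = pvAbsA n adj stack seen := by
  intro stack seen
  induction stack, seen using pvRunB.induct adj with
  | case1 seen => intro _; rw [pvRunB, pvAbsA]
  | case2 seen node parent frames ih =>
    intro hwf
    rw [pvRunB, pvAbsA, pvLoopA]
    exact ih (fun fr h => hwf fr (by simp [h]))
  | case3 seen node nb rest frames ih =>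
    intro hwf
    have hwf2 : ∀ fr ∈ (node, nb, rest) :: frames,
        fr.2.2.toFinset ⊆ adj.flatten.toFinset := by
      intro fr h
      rcases List.mem_cons.mp h with h | h
      · subst h; intro x hx
        exact hwf (node, nb, nb :: rest) (by simp) (by simp at hx ⊢; tauto)
      · exact hwf fr (by simp [h])
    rw [pvRunB, if_pos rfl, ih hwf2, pvAbsA, pvAbsA, pvLoopA, if_pos rfl]
  | case4 seen node parent nb rest frames h1 h2 =>
    intro _
    rw [pvRunB, pvAbsA, pvLoopA]
    simp [h1, h2]
  | case5 seen node parent nb rest frames h1 h2 ih =>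
    intro hwf
    rw [pvRunB, pvAbsA, pvLoopA]
    simp only [h1, h2, if_false, ite_false]
    have hdfs : pvDfsA adj (adj.flatten.length + 2) nb node seen =
        pvLoopA adj (adj.flatten.length + 2) nb node (pvAdjAt adj nb)
          (PySem.Set.add seen nb) := by
      rw [pvDfsA]
      simp only [h2, if_false, ite_false]
      have := (pvFuel adj (adj.flatten.length + 1)).2 (adj.flatten.length + 2) nb node
        (pvAdjAt adj nb) (PySem.Set.add seen nb) (pvAdjAt_subset adj nb)
        (by have := pvCardE adj (PySem.Set.add seen nb).toFinset; omega)
        (by have := pvCardE adj (PySem.Set.add seen nb).toFinset; omega)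
      exact this.1
    rw [hdfs]
    have hwf2 : ∀ fr ∈ (nb, node, pvAdjAt adj nb) :: (node, parent, rest) :: frames,
        fr.2.2.toFinset ⊆ adj.flatten.toFinset := by
      intro fr h
      rcases List.mem_cons.mp h with h | h
      · subst h; exact pvAdjAt_subset adj nb
      · rcases List.mem_cons.mp h with h | h
        · subst h; intro x hx
          exact hwf (node, parent, nb :: rest) (by simp) (by simp at hx ⊢; tauto)
        · exact hwf fr (by simp [h])
    rw [ih hwf2, pvAbsA]
    rcases hl : pvLoopA adj (adj.flatten.length + 2) nb node (pvAdjAt adj nb)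
        (PySem.Set.add seen nb) with ⟨r, s0⟩
    obtain ⟨b, s1, hbs⟩ := pvLoopA_some adj (adj.flatten.length + 2) nb node
      (pvAdjAt adj nb) (PySem.Set.add seen nb)
    rw [hl] at hbs
    injection hbs with hb hs; subst hb; subst hs
    rcases b with _ | _
    · simp [pvAbsA]
    · simp only []
      rw [pvAbsA]

-- ===== VERDICT (by name: the statement is the Claim_ definition above) =====
theorem doit_dfs_recursive_spec : Claim_equal_doit_dfs_recursive := by
  intro n edges _ _
  unfold Spec_doit_dfs_recursive doit_dfs_recursive doit_dfs_recursive_alt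
  by_cases hg : (edges.length : Int) ≠ n - 1
  · simp [hg]
  · simp only [hg, if_false, ite_false]
    set adj := pvBuildAdj n edges with hadj
    have hseen0 : PySem.Set.ofList [(0 : Int)] = [0] := by decide
    have htop : pvDfsA adj (adj.flatten.length + 3) 0 (-1) [] =
        pvLoopA adj (adj.flatten.length + 2) 0 (-1) (pvAdjAt adj 0)
          (PySem.Set.add [] 0) := by
      rw [pvDfsA]; simp
    have hadd0 : PySem.Set.add ([] : List Int) 0 = [0] := by decide
    have hwf0 : ∀ fr ∈ [((0 : Int), (-1 : Int), pvAdjAt adj 0)],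
        fr.2.2.toFinset ⊆ adj.flatten.toFinset := by
      intro fr h
      rw [List.mem_singleton] at h
      subst h
      exact pvAdjAt_subset adj 0
    have hsim := pvSim n adj [(0, -1, pvAdjAt adj 0)] [0] hwf0
    rw [hseen0, hsim, pvAbsA, ← hadd0, ← htop]
    obtain ⟨b, s1, hbs⟩ := pvLoopA_some adj (adj.flatten.length + 2) 0 (-1)
      (pvAdjAt adj 0) (PySem.Set.add [] 0)
    rw [← htop] at hbs
    rw [hbs]
    rcases b with _ | _ <;> simp [pvAbsA]
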